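-- pv_equiv track=rewrite | github.com/Tanych/launchpad | lp/ui/sort.py | availsort
-- ===== SOURCE A (Python) =====
-- def availsort(holdings_list):
--     top, remainder = [],[]
--     for holding in holdings_list:
--         try:
--             if holding['AVAILABILITY'] and holding['AVAILABILITY']['ITEM_STATUS'] == 1:
--                 top.append(holding)
--             else:
--                 remainder.append(holding)
--         except KeyError:
--             remainder.append(holding)
--     return top + remainder
-- ===== SOURCE B (Python) =====
-- def availsort(holdings_list):
--     def is_top(holding):
--         try:
--             return bool(holding['AVAILABILITY']) and holding['AVAILABILITY']['ITEM_STATUS'] == 1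
--         except KeyError:
--             return False
--     return sorted(holdings_list, key=lambda h: 0 if is_top(h) else 1)
-- ===== Notes on version B (the rewrite author's own statement) =====
-- stated objective: idiomatic
-- what changed: Replaces the two-accumulator partition loop with a single stable sort on a 0/1 availability key (an is_top predicate catching only KeyError), relying on sort stability to preserve within-group order.
import Mathlib
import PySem

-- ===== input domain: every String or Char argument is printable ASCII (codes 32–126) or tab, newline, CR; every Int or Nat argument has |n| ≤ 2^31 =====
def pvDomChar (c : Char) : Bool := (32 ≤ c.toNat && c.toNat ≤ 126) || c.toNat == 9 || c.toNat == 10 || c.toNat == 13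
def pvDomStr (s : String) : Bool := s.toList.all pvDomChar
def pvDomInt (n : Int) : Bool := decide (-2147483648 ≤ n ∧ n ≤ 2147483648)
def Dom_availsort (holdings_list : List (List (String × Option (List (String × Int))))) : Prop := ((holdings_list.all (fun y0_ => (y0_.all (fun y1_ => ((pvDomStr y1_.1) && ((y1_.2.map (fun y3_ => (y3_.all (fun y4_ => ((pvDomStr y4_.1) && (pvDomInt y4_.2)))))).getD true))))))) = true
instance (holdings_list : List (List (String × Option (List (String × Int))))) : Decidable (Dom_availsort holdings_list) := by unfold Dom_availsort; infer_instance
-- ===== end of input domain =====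

-- ===== PORT A =====
-- B is an idiomatic stable-sort re-implementation (0/1 availability key); not faster.
abbrev Holding : Type := List (String × Option (List (String × Int)))

def availsort (holdings_list : List Holding) : List Holding :=
  -- for holding in holdings_list: try: if holding['AVAILABILITY'] and …['ITEM_STATUS'] == 1 … except KeyError: remainder.append
  let tr := holdings_list.foldl (fun (tr : List Holding × List Holding) holding =>
    match PySem.Dict.get? (⟨holding⟩ : PySem.Dict String (Option (List (String × Int)))) "AVAILABILITY" with
    | none => (tr.1, tr.2 ++ [holding])            -- KeyError on 'AVAILABILITY' → except branch
    | some none => (tr.1, tr.2 ++ [holding])       -- None is falsy → else branch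
    | some (some av) =>
      if av = [] then (tr.1, tr.2 ++ [holding])    -- empty dict is falsy → else branch
      else
        match PySem.Dict.get? (⟨av⟩ : PySem.Dict String Int) "ITEM_STATUS" with
        | none => (tr.1, tr.2 ++ [holding])        -- KeyError on 'ITEM_STATUS' → except branch
        | some v => if v = 1 then (tr.1 ++ [holding], tr.2) else (tr.1, tr.2 ++ [holding]))
    ([], [])
  tr.1 ++ tr.2

-- ===== PORT B =====
-- is_top: the same check wrapped in try/except KeyError returning False
def isTop (holding : Holding) : Bool :=
  match PySem.Dict.get? (⟨holding⟩ : PySem.Dict String (Option (List (String × Int)))) "AVAILABILITY" with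
  | none => false
  | some none => false
  | some (some av) =>
    if av = [] then false
    else
      match PySem.Dict.get? (⟨av⟩ : PySem.Dict String Int) "ITEM_STATUS" with
      | none => false
      | some v => v = 1

def availsort_alt (holdings_list : List Holding) : List Holding :=
  PySem.List.sorted holdings_list (fun h => if isTop h then (0 : Int) else 1)

-- ===== PRECONDITION & SPEC =====
def Spec_availsort (holdings_list : List (List (String × Option (List (String × Int))))) (out : List (List (String × Option (List (String × Int))))) : Prop := out = availsort_alt holdings_list
instance (holdings_list : List (List (String × Option (List (String × Int))))) (out : List (List (String × Option (List (String × Int))))) : Decidable (Spec_availsort holdings_list out) := by unfold Spec_availsort; infer_instance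

-- ===== CLAIM (what is proved, stated in full; the proofs are below) =====
def Claim_equal_availsort : Prop := ∀ (holdings_list : List (List (String × Option (List (String × Int))))), Dom_availsort holdings_list → Spec_availsort holdings_list (availsort holdings_list)

-- ===== LEMMAS AND PROOFS =====


-- A's loop step is exactly a partition step on the isTop predicate.
lemma stepA_eq (tr : List Holding × List Holding) (h : Holding) :
    (match PySem.Dict.get? (⟨h⟩ : PySem.Dict String (Option (List (String × Int)))) "AVAILABILITY" with
      | none => (tr.1, tr.2 ++ [h])
      | some none => (tr.1, tr.2 ++ [h])
      | some (some av) =>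
        if av = [] then (tr.1, tr.2 ++ [h])
        else
          match PySem.Dict.get? (⟨av⟩ : PySem.Dict String Int) "ITEM_STATUS" with
          | none => (tr.1, tr.2 ++ [h])
          | some v => if v = 1 then (tr.1 ++ [h], tr.2) else (tr.1, tr.2 ++ [h])) =
    (if isTop h then (tr.1 ++ [h], tr.2) else (tr.1, tr.2 ++ [h])) := by
  unfold isTop
  rcases PySem.Dict.get? (⟨h⟩ : PySem.Dict String (Option (List (String × Int)))) "AVAILABILITY" with _ | (_ | av)
  · rfl
  · rfl
  · by_cases hav : av = []
    · simp [hav]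
    · simp only [hav, ite_false]
      rcases PySem.Dict.get? (⟨av⟩ : PySem.Dict String Int) "ITEM_STATUS" with _ | v
      · simp
      · by_cases hv : v = 1 <;> simp [hv]

lemma loopA (xs : List Holding) : ∀ t r : List Holding,
    xs.foldl (fun (tr : List Holding × List Holding) h =>
      if isTop h then (tr.1 ++ [h], tr.2) else (tr.1, tr.2 ++ [h])) (t, r) =
    (t ++ xs.filter (fun h => isTop h), r ++ xs.filter (fun h => ¬ isTop h)) := by
  induction xs with
  | nil => intro t r; simp
  | cons x xs ih =>
    intro t r
    by_cases hx : isTop x <;> simp [hx, ih, List.append_assoc]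

lemma availsort_eq_partition (xs : List Holding) :
    availsort xs = xs.filter (fun h => isTop h) ++ xs.filter (fun h => ¬ isTop h) := by
  unfold availsort
  have hf : (fun (tr : List Holding × List Holding) holding =>
      match PySem.Dict.get? (⟨holding⟩ : PySem.Dict String (Option (List (String × Int)))) "AVAILABILITY" with
      | none => (tr.1, tr.2 ++ [holding])
      | some none => (tr.1, tr.2 ++ [holding])
      | some (some av) =>
        if av = [] then (tr.1, tr.2 ++ [holding])
        else
          match PySem.Dict.get? (⟨av⟩ : PySem.Dict String Int) "ITEM_STATUS" with
          | none => (tr.1, tr.2 ++ [holding])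
          | some v => if v = 1 then (tr.1 ++ [holding], tr.2) else (tr.1, tr.2 ++ [holding])) =
      (fun (tr : List Holding × List Holding) h =>
        if isTop h then (tr.1 ++ [h], tr.2) else (tr.1, tr.2 ++ [h])) := by
    funext tr h; exact stepA_eq tr h
  rw [hf, loopA xs [] []]
  simp

lemma insertBy_partition (x : Holding) (T R : List Holding)
    (hT : ∀ y ∈ T, isTop y) (hR : ∀ y ∈ R, ¬ isTop y) (hx : isTop x) :
    PySem.List.insertBy
      (fun a b => decide ((if isTop a then (0:Int) else 1) < (if isTop b then (0:Int) else 1)))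
      x (T ++ R) = T ++ x :: R := by
  induction T with
  | nil =>
    cases R with
    | nil => rfl
    | cons y ys =>
      have hy := hR y (by simp)
      simp [PySem.List.insertBy, hx, hy]
  | cons t ts ih =>
    have ht := hT t (by simp)
    have hrec := ih (fun y hy => hT y (by simp [hy]))
    simp [PySem.List.insertBy, hx, ht, hrec]

lemma loopB (xs : List Holding) : ∀ T R : List Holding,
    (∀ y ∈ T, isTop y) → (∀ y ∈ R, ¬ isTop y) →
    xs.foldl (fun acc x => PySem.List.insertBy
      (fun a b => decide ((if isTop a then (0:Int) else 1) < (if isTop b then (0:Int) else 1)))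
      x acc) (T ++ R) =
    (T ++ xs.filter (fun h => isTop h)) ++ (R ++ xs.filter (fun h => ¬ isTop h)) := by
  induction xs with
  | nil => intro T R _ _; simp
  | cons x xs ih =>
    intro T R hT hR
    by_cases hx : isTop x
    · rw [List.foldl_cons, insertBy_partition x T R hT hR hx]
      have he : T ++ x :: R = (T ++ [x]) ++ R := by simp
      have hT' : ∀ y ∈ T ++ [x], isTop y := by
        intro y hy
        rcases List.mem_append.1 hy with h | h
        · exact hT y h
        · simp at h; simpa [h] using hx
      rw [he, ih (T ++ [x]) R hT' hR]
      simp [hx, List.append_assoc]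
    · rw [List.foldl_cons,
        PySem.List.insertBy_of_forall_not_before _ x (T ++ R) ?_]
      · have he : (T ++ R) ++ [x] = T ++ (R ++ [x]) := by simp
        have hR' : ∀ y ∈ R ++ [x], ¬ isTop y := by
          intro y hy
          rcases List.mem_append.1 hy with h | h
          · exact hR y h
          · simp at h; simpa [h] using hx
        rw [he, ih T (R ++ [x]) hT hR']
        simp [hx, List.append_assoc]
      · intro y _
        simp only [hx]
        by_cases hy : isTop y <;> simp [hy]

lemma availsort_alt_eq_partition (xs : List Holding) :
    availsort_alt xs = xs.filter (fun h => isTop h) ++ xs.filter (fun h => ¬ isTop h) := by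
  unfold availsort_alt
  rw [PySem.List.sorted_eq_foldl_insertBy]
  have hB := loopB xs [] [] (by simp) (by simp)
  simpa using hB

-- ===== VERDICT (by name: the statement is the Claim_ definition above) =====
theorem availsort_spec : Claim_equal_availsort := by
  intro xs _
  unfold Spec_availsort
  rw [availsort_eq_partition, availsort_alt_eq_partition]
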